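-- pv_equiv track=rewrite | github.com/oxalorg/liquidpy | liquid/stream.py | words_to_matrix
-- ===== SOURCE A (Python) =====
-- def words_to_matrix(words):
-- 	"""
-- 	Convert words to matrix for searching.
-- 	For example:
-- 	```
-- 	['{%', '{%-', '{{'] => [
-- 		{'{': 0},     3 shares, 0 endings
-- 		{'%': 1, '{': 1},
-- 		{'-': 1}
-- 	]
-- 	```
-- 	"""
-- 	matrix = [{} for _ in range(max(len(word) for word in words))]
-- 	for word in words:
-- 		for i, char in enumerate(word):
-- 			matrix[i].setdefault(char, 0)
-- 			if i == len(word) - 1: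
-- 				matrix[i][char] += 1
-- 	return matrix
-- ===== SOURCE B (Python) =====
-- def words_to_matrix(words):
--     # Column-major rebuild: each position's dict is built independently,
--     # first a setdefault pass (key order), then a separate ending-count pass.
--     maxlen = max(len(word) for word in words)
--     matrix = []
--     for i in range(maxlen):
--         col = {}
--         for word in words:
--             if i < len(word):
--                 col.setdefault(word[i], 0)
--         for word in words:
--             if len(word) == i + 1:
--                 col[word[i]] += 1
--         matrix.append(col)
--     return matrix
-- ===== Notes on version B (the rewrite author's own statement) =====
-- stated objective: alternative
-- what changed: B builds the matrix column-major: for each position it makes the dict independently with a setdefault pass over all words followed by a separate ending-count pass, instead of A's single row-major loop that interleaves setdefault and the last-char increment per character.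
import Mathlib
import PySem

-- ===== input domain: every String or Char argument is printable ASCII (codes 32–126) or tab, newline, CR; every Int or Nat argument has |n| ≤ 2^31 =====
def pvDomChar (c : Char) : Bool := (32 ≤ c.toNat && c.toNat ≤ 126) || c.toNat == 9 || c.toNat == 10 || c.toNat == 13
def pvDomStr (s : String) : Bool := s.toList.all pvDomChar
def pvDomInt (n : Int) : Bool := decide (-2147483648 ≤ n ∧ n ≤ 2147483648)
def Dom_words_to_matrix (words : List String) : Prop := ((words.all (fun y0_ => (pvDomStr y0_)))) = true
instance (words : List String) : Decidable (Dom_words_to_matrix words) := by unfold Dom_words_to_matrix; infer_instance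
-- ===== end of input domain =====

-- B builds the matrix column-major (per-position setdefault pass, then a separate ending-count pass)
-- instead of A's row-major interleaved loop; return values proved equal on non-empty word lists.

-- ===== PORT A =====
-- body of A's inner loop for one character: matrix[i].setdefault(char, 0); if i == len(word)-1: matrix[i][char] += 1
def wtmCell (wlen i : Nat) (c : Char) (d : PySem.Dict String Int) : PySem.Dict String Int :=
  let d1 := d.setdefault (String.singleton c) 0
  if i = wlen - 1 then d1.modify (String.singleton c) 0 (· + 1) else d1

-- hand port (exact) of `for i, char in enumerate(word)`: walks the characters with a running index
def wtmRow (wlen i : Nat) (cs : List Char) (mat : List (PySem.Dict String Int)) :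
    List (PySem.Dict String Int) :=
  match cs with
  | [] => mat
  | c :: rest => wtmRow wlen (i + 1) rest (mat.modify i (wtmCell wlen i c))

def words_to_matrix (words : List String) : List (List (String × Int)) :=
  let maxlen := words.foldl (fun m w => max m w.toList.length) 0
  let matrix := words.foldl (fun mat w => wtmRow w.toList.length 0 w.toList mat)
      (List.replicate maxlen PySem.Dict.empty)
  matrix.map (fun d => d.items)

-- ===== PORT B =====
-- first pass of Source B's column loop: `if i < len(word): col.setdefault(word[i], 0)`
def wtmSetStep (i : Nat) (d : PySem.Dict String Int) (w : String) : PySem.Dict String Int :=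
  match w.toList[i]? with
  | some c => d.setdefault (String.singleton c) 0
  | none => d

-- second pass of Source B's column loop: `if len(word) == i + 1: col[word[i]] += 1`
def wtmIncStep (i : Nat) (d : PySem.Dict String Int) (w : String) : PySem.Dict String Int :=
  if w.toList.length = i + 1 then d.modify (String.singleton (w.toList.getD i ' ')) 0 (· + 1) else d

def words_to_matrix_alt (words : List String) : List (List (String × Int)) :=
  let maxlen := words.foldl (fun m w => max m w.toList.length) 0
  (List.range maxlen).map (fun i =>
    (words.foldl (wtmIncStep i) (words.foldl (wtmSetStep i) PySem.Dict.empty)).items)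

-- ===== PRECONDITION & SPEC =====
-- Pre_ excludes only the empty list, on which A's `max(...)` raises ValueError (B raises there too).
def Pre_words_to_matrix (words : List String) : Prop := words ≠ []
instance (words : List String) : Decidable (Pre_words_to_matrix words) := by
  unfold Pre_words_to_matrix; infer_instance

def pvWitness_words_to_matrix : List String := ["{%", "{%-", "{{"]

def Spec_words_to_matrix (words : List String) (out : List (List (String × Int))) : Prop :=
  out = words_to_matrix_alt words
instance (words : List String) (out : List (List (String × Int))) :
    Decidable (Spec_words_to_matrix words out) := by unfold Spec_words_to_matrix; infer_instance

-- ===== CLAIM (what is proved, stated in full; the proofs are below) =====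
def Claim_equal_words_to_matrix : Prop := ∀ (words : List String), Dom_words_to_matrix words →
  Pre_words_to_matrix words → Spec_words_to_matrix words (words_to_matrix words)

-- ===== LEMMAS AND PROOFS =====

-- A's per-word effect on column j, as a single dict operation
def wtmColOp (j : Nat) (d : PySem.Dict String Int) (w : String) : PySem.Dict String Int :=
  match w.toList[j]? with
  | some c => wtmCell w.toList.length j c d
  | none => d

theorem wtmRow_length (wlen : Nat) (cs : List Char) (i : Nat) (mat : List (PySem.Dict String Int)) :
    (wtmRow wlen i cs mat).length = mat.length := by
  induction cs generalizing i mat with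
  | nil => rfl
  | cons c rest ih => simp [wtmRow, ih]

theorem wtmRow_getElem (wlen : Nat) (cs : List Char) (i0 j : Nat)
    (mat : List (PySem.Dict String Int)) :
    (wtmRow wlen i0 cs mat)[j]? =
      if i0 ≤ j then
        mat[j]?.map (fun d => match cs[j - i0]? with
          | some c => wtmCell wlen j c d
          | none => d)
      else mat[j]? := by
  induction cs generalizing i0 mat with
  | nil =>
    simp only [wtmRow, List.getElem?_nil]
    split <;> cases mat[j]? <;> rfl
  | cons c rest ih =>
    simp only [wtmRow]
    rw [ih, List.getElem?_modify]
    rcases lt_trichotomy j i0 with h | h | h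
    · have h1 : ¬ (i0 + 1 ≤ j) := by omega
      have h2 : ¬ (i0 ≤ j) := by omega
      have h3 : i0 ≠ j := by omega
      simp only [h1, if_false, h2, if_false, h3]
      cases mat[j]? <;> rfl
    · subst h
      have h1 : ¬ (j + 1 ≤ j) := by omega
      simp only [h1, if_false, le_refl, if_true, Nat.sub_self,
        List.getElem?_cons_zero]
      cases mat[j]? <;> rfl
    · have h1 : i0 + 1 ≤ j := by omega
      have h2 : i0 ≤ j := by omega
      have h3 : i0 ≠ j := by omega
      have h4 : j - i0 = (j - (i0 + 1)) + 1 := by omega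
      simp only [h1, if_true, h2, h3, if_false, h4, List.getElem?_cons_succ]
      cases mat[j]? <;> rfl

theorem wtm_foldA_length (words : List String) (mat : List (PySem.Dict String Int)) :
    (words.foldl (fun mat w => wtmRow w.toList.length 0 w.toList mat) mat).length = mat.length := by
  induction words generalizing mat with
  | nil => rfl
  | cons w ws ih =>
    simp only [List.foldl_cons]
    rw [ih, wtmRow_length]

theorem wtm_foldA_getElem (words : List String) (j : Nat) :
    ∀ (mat : List (PySem.Dict String Int)) (d : PySem.Dict String Int), mat[j]? = some d →
    (words.foldl (fun mat w => wtmRow w.toList.length 0 w.toList mat) mat)[j]? =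
      some (words.foldl (wtmColOp j) d) := by
  induction words with
  | nil => intro mat d h; simpa using h
  | cons w ws ih =>
    intro mat d h
    simp only [List.foldl_cons]
    apply ih
    rw [wtmRow_getElem]
    simp only [Nat.zero_le, if_true, Nat.sub_zero, h, Option.map_some]
    rfl

theorem wtm_contains_setStep (i : Nat) (d : PySem.Dict String Int) (w : String) (k : String)
    (h : d.contains k = true) : (wtmSetStep i d w).contains k = true := by
  unfold wtmSetStep
  cases w.toList[i]? with
  | none => exact h
  | some c => rw [PySem.Dict.contains_setdefault]; simp [h]

theorem wtm_dict_insert_app (d : PySem.Dict String Int) (s : String) (v : Int)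
    (hs : d.contains s = false) : d.insert s v = PySem.Dict.mk (d.items ++ [(s, v)]) := by
  unfold PySem.Dict.insert
  rw [if_neg (by simp [hs])]

theorem wtm_dict_insert_map (d : PySem.Dict String Int) (k : String) (v : Int)
    (hk : d.contains k = true) :
    d.insert k v = PySem.Dict.mk (d.items.map (fun p => if p.1 == k then (k, v) else p)) := by
  unfold PySem.Dict.insert
  rw [if_pos hk]

theorem wtm_dict_modify_eq (d : PySem.Dict String Int) (k : String) (f : Int → Int) :
    d.modify k 0 f = d.insert k (f (d.getD k 0)) := rfl

theorem wtm_commute_one (i : Nat) (d : PySem.Dict String Int) (w : String) (k : String)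
    (h : d.contains k = true) :
    wtmSetStep i (d.modify k 0 (· + 1)) w = (wtmSetStep i d w).modify k 0 (· + 1) := by
  unfold wtmSetStep
  cases hc : w.toList[i]? with
  | none => rfl
  | some c =>
    dsimp only
    by_cases hs : d.contains (String.singleton c) = true
    · have h1 : (d.modify k 0 (· + 1)).contains (String.singleton c) = true := by
        rw [PySem.Dict.contains_modify]; simp [hs]
      rw [PySem.Dict.setdefault_of_contains _ _ h1, PySem.Dict.setdefault_of_contains _ _ hs]
    · have hs' : d.contains (String.singleton c) = false := by
        cases hx : d.contains (String.singleton c) <;> simp_all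
      have hne : String.singleton c ≠ k := by
        intro e; rw [e, h] at hs'; exact absurd hs' (by simp)
      have h1 : (d.modify k 0 (· + 1)).contains (String.singleton c) = false := by
        rw [PySem.Dict.contains_modify]
        simp [hs', hne]
      rw [PySem.Dict.setdefault_of_not_contains _ _ h1,
          PySem.Dict.setdefault_of_not_contains _ _ hs']
      -- both sides at items level
      have hgd : (d.insert (String.singleton c) 0).getD k 0 = d.getD k 0 := by
        unfold PySem.Dict.getD
        rw [show d.insert (String.singleton c) 0 = d.setdefault (String.singleton c) 0 from
              (PySem.Dict.setdefault_of_not_contains _ _ hs').symm,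
            PySem.Dict.get?_setdefault_of_ne _ _ (fun e => hne e.symm)]
      have hck : (d.insert (String.singleton c) 0).contains k = true := by
        rw [show d.insert (String.singleton c) 0 = d.setdefault (String.singleton c) 0 from
              (PySem.Dict.setdefault_of_not_contains _ _ hs').symm,
            PySem.Dict.contains_setdefault]
        simp [h]
      rw [wtm_dict_modify_eq, wtm_dict_modify_eq, hgd]
      rw [wtm_dict_modify_eq] at h1
      rw [wtm_dict_insert_map d k _ h] at h1 ⊢
      rw [wtm_dict_insert_app d _ _ hs'] at hck ⊢
      rw [wtm_dict_insert_app _ _ _ h1, wtm_dict_insert_map _ _ _ hck]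
      apply PySem.Dict.ext
      simp only [List.map_append, List.map_cons, List.map_nil]
      have hbe : ((String.singleton c == k) = false) := by simp [hne]
      simp [hbe]

theorem wtm_commute_fold (i : Nat) (ws : List String) :
    ∀ (d : PySem.Dict String Int) (k : String), d.contains k = true →
    ws.foldl (wtmSetStep i) (d.modify k 0 (· + 1)) =
      (ws.foldl (wtmSetStep i) d).modify k 0 (· + 1) := by
  induction ws with
  | nil => intro d k _; rfl
  | cons w ws ih =>
    intro d k h
    simp only [List.foldl_cons]
    rw [wtm_commute_one i d w k h]
    exact ih _ k (wtm_contains_setStep i d w k h)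

theorem wtm_colOp_eq (j : Nat) (d : PySem.Dict String Int) (w : String) :
    wtmColOp j d w = wtmIncStep j (wtmSetStep j d w) w := by
  unfold wtmColOp wtmSetStep wtmIncStep
  cases hc : w.toList[j]? with
  | none =>
    have hlen : w.toList.length ≤ j := List.getElem?_eq_none_iff.mp hc
    dsimp only
    rw [if_neg (by omega)]
  | some c =>
    have hlt : j < w.toList.length := by
      rcases List.getElem?_eq_some_iff.mp hc with ⟨h, _⟩; exact h
    have hgd : w.toList.getD j ' ' = c := by
      simp [List.getD, hc]
    dsimp only
    simp only [wtmCell, hgd]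
    by_cases he : w.toList.length = j + 1
    · rw [if_pos (show j = w.toList.length - 1 by omega), if_pos he]
    · rw [if_neg (show ¬ j = w.toList.length - 1 by omega), if_neg he]

theorem wtm_col_two_pass (j : Nat) (ws : List String) :
    ∀ (d : PySem.Dict String Int),
    ws.foldl (wtmColOp j) d = ws.foldl (wtmIncStep j) (ws.foldl (wtmSetStep j) d) := by
  induction ws with
  | nil => intro d; rfl
  | cons w ws ih =>
    intro d
    simp only [List.foldl_cons]
    rw [ih, wtm_colOp_eq]
    congr 1
    unfold wtmIncStep
    by_cases he : w.toList.length = j + 1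
    · simp only [if_pos he]
      have hc : j < w.toList.length := by omega
      have hsome : w.toList[j]? = some (w.toList.getD j ' ') := by
        rw [List.getElem?_eq_getElem hc]
        simp [List.getD, List.getElem?_eq_getElem hc]
      have hcontains : (wtmSetStep j d w).contains (String.singleton (w.toList.getD j ' ')) = true := by
        unfold wtmSetStep
        rw [hsome, PySem.Dict.contains_setdefault]
        simp
      exact wtm_commute_fold j ws _ _ hcontains
    · simp only [if_neg he]

-- ===== VERDICT (by name: the statement is the Claim_ definition above) =====
theorem words_to_matrix_spec : Claim_equal_words_to_matrix := by
  unfold Claim_equal_words_to_matrix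
  intro words _ _
  unfold Spec_words_to_matrix words_to_matrix words_to_matrix_alt
  apply List.ext_getElem?
  intro j
  rw [List.getElem?_map, List.getElem?_map]
  by_cases hj : j < words.foldl (fun m w => max m w.toList.length) 0
  · rw [wtm_foldA_getElem words j _ PySem.Dict.empty (by rw [List.getElem?_replicate, if_pos hj]),
        List.getElem?_range hj]
    simp only [Option.map_some]
    rw [wtm_col_two_pass]
  · have h1 : (words.foldl (fun mat w => wtmRow w.toList.length 0 w.toList mat)
        (List.replicate (words.foldl (fun m w => max m w.toList.length) 0) PySem.Dict.empty))[j]? = none := by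
      rw [List.getElem?_eq_none_iff, wtm_foldA_length, List.length_replicate]
      omega
    have h2 : (List.range (words.foldl (fun m w => max m w.toList.length) 0))[j]? = none := by
      rw [List.getElem?_eq_none_iff, List.length_range]
      omega
    rw [h1, h2]
    rfl
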